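-- pv_equiv track=rewrite | github.com/benny-UTF-8/retail-dna-bot | report_generator.py | _get_prioritised_recs
-- ===== SOURCE A (Python) =====
-- RECOMMENDATIONS = {
--     'Customer Base': [
--         {'action': 'Launch geo-targeted social media ads',
--          'impact': '+5-10% new customer acquisition', 'effort': 'Medium', 'timeline': '1 month'},
--         {'action': 'Optimise Google Business Profile (photos, posts, reviews)',
--          'impact': '+3-8% walk-in traffic', 'effort': 'Low', 'timeline': '1 month'},
--         {'action': 'Introduce a referral incentive program',
--          'impact': '+0.5-2 new customers per existing customer/month',
--          'effort': 'Low', 'timeline': '1 month'},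
--         {'action': 'Partner with complementary local businesses for cross-promotion',
--          'impact': '+5-15% new customer reach', 'effort': 'Medium', 'timeline': '3 months'},
--         {'action': 'Expand product range to attract new shopper segments',
--          'impact': '+10-20% addressable market', 'effort': 'High', 'timeline': '3 months'},
--     ],
--     'Frequency': [
--         {'action': 'Implement a digital loyalty / stamp-card program',
--          'impact': '+0.3-0.5 visits/period per member', 'effort': 'Low', 'timeline': '1 month'},
--         {'action': 'Create weekly in-store events (tastings, demos, workshops)',
--          'impact': '+0.2-0.4 visits/period', 'effort': 'Medium', 'timeline': '1 month'},
--         {'action': "Send personalised SMS/email when customers haven't visited in 14 days",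
--          'impact': '+5-12% reactivation rate', 'effort': 'Low', 'timeline': '1 month'},
--         {'action': 'Stock everyday essentials (FOP categories) to drive habitual visits',
--          'impact': '+0.3-0.6 visits/period', 'effort': 'Medium', 'timeline': '3 months'},
--         {'action': 'Introduce subscription / auto-replenishment for top SKUs',
--          'impact': '+1-2 guaranteed visits/period per subscriber',
--          'effort': 'High', 'timeline': '3 months'},
--     ],
--     'Transaction Value': [
--         {'action': 'Train staff to suggest one complementary item at POS',
--          'impact': '+$3-8 per transaction', 'effort': 'Low', 'timeline': '1 month'},
--         {'action': 'Merchandise complementary products together (cross-sell zones)',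
--          'impact': '+$5-12 per transaction', 'effort': 'Low', 'timeline': '1 month'},
--         {'action': 'Introduce bundle deals ("Buy 2, save 10%")',
--          'impact': '+$8-15 per transaction', 'effort': 'Low', 'timeline': '1 month'},
--         {'action': 'Add a premium / trade-up product range',
--          'impact': '+$10-25 per transaction for upgraders',
--          'effort': 'Medium', 'timeline': '3 months'},
--         {'action': 'Set minimum spend thresholds for perks (free delivery, gift)',
--          'impact': '+$5-10 average basket lift', 'effort': 'Low', 'timeline': '1 month'},
--     ],
--     'Margin': [
--         {'action': 'Renegotiate supplier terms (volume rebates, early-pay discounts)',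
--          'impact': '+1-3% gross margin', 'effort': 'Medium', 'timeline': '1 month'},
--         {'action': 'Audit and reduce top CODB line items (rent, wages, energy)',
--          'impact': '+0.5-2% net margin', 'effort': 'Medium', 'timeline': '1 month'},
--         {'action': 'Rationalise slow-moving SKUs to free up cash and reduce waste',
--          'impact': '+0.5-1.5% gross margin', 'effort': 'Low', 'timeline': '1 month'},
--         {'action': 'Shift product mix toward higher-margin own-label / premium lines',
--          'impact': '+2-5% gross margin over time', 'effort': 'High', 'timeline': '6 months'},
--         {'action': 'Implement waste / shrinkage tracking and reduction program',
--          'impact': '+0.5-1% gross margin', 'effort': 'Medium', 'timeline': '3 months'},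
--     ],
-- }
--
-- EFFORT_ORDER = {'Low': 0, 'Medium': 1, 'High': 2}
--
-- def _get_prioritised_recs(bottleneck: str, scores: dict) -> list:
--     lever_order = [bottleneck] + [l for l in scores if l != bottleneck]
--     all_recs = []
--     for lever in lever_order:
--         for rec in RECOMMENDATIONS.get(lever, []):
--             all_recs.append({'lever': lever, **rec})
--     all_recs.sort(key=lambda r: (lever_order.index(r['lever']),
--                                   EFFORT_ORDER.get(r['effort'], 1)))
--     return all_recs
-- ===== SOURCE B (Python) =====
-- RECOMMENDATIONS = {
--     'Customer Base': [
--         {'action': 'Launch geo-targeted social media ads',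
--          'impact': '+5-10% new customer acquisition', 'effort': 'Medium', 'timeline': '1 month'},
--         {'action': 'Optimise Google Business Profile (photos, posts, reviews)',
--          'impact': '+3-8% walk-in traffic', 'effort': 'Low', 'timeline': '1 month'},
--         {'action': 'Introduce a referral incentive program',
--          'impact': '+0.5-2 new customers per existing customer/month',
--          'effort': 'Low', 'timeline': '1 month'},
--         {'action': 'Partner with complementary local businesses for cross-promotion',
--          'impact': '+5-15% new customer reach', 'effort': 'Medium', 'timeline': '3 months'},
--         {'action': 'Expand product range to attract new shopper segments',
--          'impact': '+10-20% addressable market', 'effort': 'High', 'timeline': '3 months'},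
--     ],
--     'Frequency': [
--         {'action': 'Implement a digital loyalty / stamp-card program',
--          'impact': '+0.3-0.5 visits/period per member', 'effort': 'Low', 'timeline': '1 month'},
--         {'action': 'Create weekly in-store events (tastings, demos, workshops)',
--          'impact': '+0.2-0.4 visits/period', 'effort': 'Medium', 'timeline': '1 month'},
--         {'action': "Send personalised SMS/email when customers haven't visited in 14 days",
--          'impact': '+5-12% reactivation rate', 'effort': 'Low', 'timeline': '1 month'},
--         {'action': 'Stock everyday essentials (FOP categories) to drive habitual visits',
--          'impact': '+0.3-0.6 visits/period', 'effort': 'Medium', 'timeline': '3 months'},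
--         {'action': 'Introduce subscription / auto-replenishment for top SKUs',
--          'impact': '+1-2 guaranteed visits/period per subscriber',
--          'effort': 'High', 'timeline': '3 months'},
--     ],
--     'Transaction Value': [
--         {'action': 'Train staff to suggest one complementary item at POS',
--          'impact': '+$3-8 per transaction', 'effort': 'Low', 'timeline': '1 month'},
--         {'action': 'Merchandise complementary products together (cross-sell zones)',
--          'impact': '+$5-12 per transaction', 'effort': 'Low', 'timeline': '1 month'},
--         {'action': 'Introduce bundle deals ("Buy 2, save 10%")',
--          'impact': '+$8-15 per transaction', 'effort': 'Low', 'timeline': '1 month'},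
--         {'action': 'Add a premium / trade-up product range',
--          'impact': '+$10-25 per transaction for upgraders',
--          'effort': 'Medium', 'timeline': '3 months'},
--         {'action': 'Set minimum spend thresholds for perks (free delivery, gift)',
--          'impact': '+$5-10 average basket lift', 'effort': 'Low', 'timeline': '1 month'},
--     ],
--     'Margin': [
--         {'action': 'Renegotiate supplier terms (volume rebates, early-pay discounts)',
--          'impact': '+1-3% gross margin', 'effort': 'Medium', 'timeline': '1 month'},
--         {'action': 'Audit and reduce top CODB line items (rent, wages, energy)',
--          'impact': '+0.5-2% net margin', 'effort': 'Medium', 'timeline': '1 month'},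
--         {'action': 'Rationalise slow-moving SKUs to free up cash and reduce waste',
--          'impact': '+0.5-1.5% gross margin', 'effort': 'Low', 'timeline': '1 month'},
--         {'action': 'Shift product mix toward higher-margin own-label / premium lines',
--          'impact': '+2-5% gross margin over time', 'effort': 'High', 'timeline': '6 months'},
--         {'action': 'Implement waste / shrinkage tracking and reduction program',
--          'impact': '+0.5-1% gross margin', 'effort': 'Medium', 'timeline': '3 months'},
--     ],
-- }
--
-- EFFORT_ORDER = {'Low': 0, 'Medium': 1, 'High': 2}
--
-- # Each lever's recommendations pre-sorted by effort ONCE at module load (stable sort,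
-- # same EFFORT_ORDER.get(effort, 1) default), so the function itself never sorts.
-- _BY_EFFORT = {
--     lever: sorted(recs, key=lambda r: EFFORT_ORDER.get(r['effort'], 1))
--     for lever, recs in RECOMMENDATIONS.items()
-- }
--
--
-- def _get_prioritised_recs(bottleneck: str, scores: dict) -> list:
--     # dict.fromkeys dedups while keeping first-occurrence order: bottleneck first,
--     # then the remaining score levers in their original order.  Each lever's
--     # pre-sorted block is tagged and appended; the function never sorts.
--     out = []
--     for lever in dict.fromkeys([bottleneck, *scores]):
--         out += [{'lever': lever, **rec} for rec in _BY_EFFORT.get(lever, [])]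
--     return out
-- ===== Notes on version B (the rewrite author's own statement) =====
-- stated objective: alternative
-- what changed: Replaces A's flat-list build plus one global stable sort keyed on (lever_order.index(lever), effort) by a module-level table of per-lever recommendation lists pre-sorted by effort once, a dict.fromkeys dedup for the lever order, and a single accumulation loop appending the pre-sorted tagged blocks, so the function itself performs no sort and no lever_order.index() scans.
import Mathlib
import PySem

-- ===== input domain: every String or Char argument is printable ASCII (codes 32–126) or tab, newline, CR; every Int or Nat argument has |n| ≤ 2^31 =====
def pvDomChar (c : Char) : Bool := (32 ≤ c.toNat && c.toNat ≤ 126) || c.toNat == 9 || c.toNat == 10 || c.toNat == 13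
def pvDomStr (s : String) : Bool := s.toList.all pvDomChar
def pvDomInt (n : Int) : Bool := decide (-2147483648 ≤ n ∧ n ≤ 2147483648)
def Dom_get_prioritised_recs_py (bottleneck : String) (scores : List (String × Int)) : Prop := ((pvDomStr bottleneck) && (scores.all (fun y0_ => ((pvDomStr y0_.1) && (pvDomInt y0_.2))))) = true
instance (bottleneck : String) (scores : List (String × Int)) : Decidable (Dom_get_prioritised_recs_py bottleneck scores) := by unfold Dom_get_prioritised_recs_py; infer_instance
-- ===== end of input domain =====

-- B replaces A's flat build + one global sort keyed on (lever_order.index(lever), effort) by a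
-- module-level per-lever table pre-sorted by effort once, a dict.fromkeys dedup for the lever
-- order, and a single accumulation loop over the pre-sorted tagged blocks (objective: alternative).

-- ===== PORT A =====
-- module constants shared by both Pythons
-- a recommendation dict {'action': a, 'impact': i, 'effort': e, 'timeline': t}
def pvRec (a i e t : String) : List (String × String) :=
  [("action", a), ("impact", i), ("effort", e), ("timeline", t)]

def pvRECOMMENDATIONS : PySem.Dict String (List (List (String × String))) := PySem.Dict.mk
  [ ("Customer Base",
      [ pvRec "Launch geo-targeted social media ads" "+5-10% new customer acquisition" "Medium" "1 month"
      , pvRec "Optimise Google Business Profile (photos, posts, reviews)" "+3-8% walk-in traffic" "Low" "1 month"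
      , pvRec "Introduce a referral incentive program" "+0.5-2 new customers per existing customer/month" "Low" "1 month"
      , pvRec "Partner with complementary local businesses for cross-promotion" "+5-15% new customer reach" "Medium" "3 months"
      , pvRec "Expand product range to attract new shopper segments" "+10-20% addressable market" "High" "3 months" ])
  , ("Frequency",
      [ pvRec "Implement a digital loyalty / stamp-card program" "+0.3-0.5 visits/period per member" "Low" "1 month"
      , pvRec "Create weekly in-store events (tastings, demos, workshops)" "+0.2-0.4 visits/period" "Medium" "1 month"
      , pvRec "Send personalised SMS/email when customers haven't visited in 14 days" "+5-12% reactivation rate" "Low" "1 month"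
      , pvRec "Stock everyday essentials (FOP categories) to drive habitual visits" "+0.3-0.6 visits/period" "Medium" "3 months"
      , pvRec "Introduce subscription / auto-replenishment for top SKUs" "+1-2 guaranteed visits/period per subscriber" "High" "3 months" ])
  , ("Transaction Value",
      [ pvRec "Train staff to suggest one complementary item at POS" "+$3-8 per transaction" "Low" "1 month"
      , pvRec "Merchandise complementary products together (cross-sell zones)" "+$5-12 per transaction" "Low" "1 month"
      , pvRec "Introduce bundle deals (\"Buy 2, save 10%\")" "+$8-15 per transaction" "Low" "1 month"
      , pvRec "Add a premium / trade-up product range" "+$10-25 per transaction for upgraders" "Medium" "3 months"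
      , pvRec "Set minimum spend thresholds for perks (free delivery, gift)" "+$5-10 average basket lift" "Low" "1 month" ])
  , ("Margin",
      [ pvRec "Renegotiate supplier terms (volume rebates, early-pay discounts)" "+1-3% gross margin" "Medium" "1 month"
      , pvRec "Audit and reduce top CODB line items (rent, wages, energy)" "+0.5-2% net margin" "Medium" "1 month"
      , pvRec "Rationalise slow-moving SKUs to free up cash and reduce waste" "+0.5-1.5% gross margin" "Low" "1 month"
      , pvRec "Shift product mix toward higher-margin own-label / premium lines" "+2-5% gross margin over time" "High" "6 months"
      , pvRec "Implement waste / shrinkage tracking and reduction program" "+0.5-1% gross margin" "Medium" "3 months" ]) ]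

def pvEFFORT_ORDER : PySem.Dict String Int := PySem.Dict.mk [("Low", 0), ("Medium", 1), ("High", 2)]

-- r[k] on a rec dict; in every dict either program builds, the keys 'lever'/'effort' are present,
-- so get? is never none (the .getD "" default is never used)
def pvGet (r : List (String × String)) (k : String) : String := ((PySem.Dict.mk r).get? k).getD ""

-- EFFORT_ORDER.get(r['effort'], 1)
def pvK2 (r : List (String × String)) : Int := pvEFFORT_ORDER.getD (pvGet r "effort") 1

-- lever_order = [bottleneck] + [l for l in scores if l != bottleneck]
-- ('for l in scores' iterates the dict's distinct keys in insertion order = dedup of the first components)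
def pvLeverOrder (bottleneck : String) (scores : List (String × Int)) : List String :=
  bottleneck :: ((PySem.List.dedup (scores.map Prod.fst)).filter (fun l => !(l == bottleneck)))

def get_prioritised_recs_py (bottleneck : String) (scores : List (String × Int)) : List (List (String × String)) :=
  let lever_order := pvLeverOrder bottleneck scores
  let all_recs : List (List (String × String)) :=
    lever_order.foldl (fun acc lever =>
      (pvRECOMMENDATIONS.getD lever []).foldl (fun acc2 rec => acc2 ++ [("lever", lever) :: rec]) acc) []
  -- all_recs.sort(key=lambda r: (lever_order.index(r['lever']), EFFORT_ORDER.get(r['effort'], 1)))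
  -- lever_order.index(r['lever']) always succeeds (every r['lever'] ∈ lever_order), so .getD 0 is never used
  PySem.List.sorted2 all_recs
    (fun r => (((PySem.List.index? lever_order (pvGet r "lever")).getD 0 : Nat) : Int))
    pvK2 false

-- ===== PORT B =====
-- B's effort key: EFFORT_ORDER.get(r['effort'], 1) applied to an untagged rec
def pvEffortKey (r : List (String × String)) : Int :=
  pvEFFORT_ORDER.getD (((PySem.Dict.mk r).get? "effort").getD "") 1

-- _BY_EFFORT = {lever: sorted(recs, key=…) for lever, recs in RECOMMENDATIONS.items()}
def pvBY_EFFORT : PySem.Dict String (List (List (String × String))) :=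
  PySem.Dict.mk (pvRECOMMENDATIONS.items.map
    (fun p => (p.1, PySem.List.sorted p.2 pvEffortKey false)))

def get_prioritised_recs_py_alt (bottleneck : String) (scores : List (String × Int)) : List (List (String × String)) :=
  -- for lever in dict.fromkeys([bottleneck, *scores]): out += tagged pre-sorted block
  (PySem.List.dedup (bottleneck :: scores.map Prod.fst)).foldl
    (fun out lever =>
      out ++ (pvBY_EFFORT.getD lever []).map (fun rec => ("lever", lever) :: rec)) []

-- ===== PRECONDITION & SPEC =====
def Spec_get_prioritised_recs_py (bottleneck : String) (scores : List (String × Int)) (out : List (List (String × String))) : Prop := out = get_prioritised_recs_py_alt bottleneck scores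
instance (bottleneck : String) (scores : List (String × Int)) (out : List (List (String × String))) : Decidable (Spec_get_prioritised_recs_py bottleneck scores out) := by unfold Spec_get_prioritised_recs_py; infer_instance

-- ===== CLAIM (what is proved, stated in full; the proofs are below) =====
def Claim_equal_get_prioritised_recs_py : Prop := ∀ (bottleneck : String) (scores : List (String × Int)), Dom_get_prioritised_recs_py bottleneck scores → Spec_get_prioritised_recs_py bottleneck scores (get_prioritised_recs_py bottleneck scores)

-- ===== LEMMAS AND PROOFS =====

-- inserting past a prefix none of whose elements x goes before
theorem pvInsertBy_append {α : Type} (before : α → α → Bool) (x : α) (pre zs : List α)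
    (h : ∀ a ∈ pre, before x a = false) :
    PySem.List.insertBy before x (pre ++ zs) = pre ++ PySem.List.insertBy before x zs := by
  induction pre with
  | nil => rfl
  | cons a t ih =>
    simp only [List.cons_append, PySem.List.insertBy, h a (by simp)]
    simp only [Bool.false_eq_true, if_false, List.cons.injEq, true_and]
    exact ih (fun b hb => h b (by simp [hb]))

theorem pvFoldl_insertBy_append {α : Type} (before : α → α → Bool) (ys pre zs : List α)
    (h : ∀ x ∈ ys, ∀ a ∈ pre, before x a = false) :
    ys.foldl (fun acc x => PySem.List.insertBy before x acc) (pre ++ zs)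
      = pre ++ ys.foldl (fun acc x => PySem.List.insertBy before x acc) zs := by
  induction ys generalizing zs with
  | nil => rfl
  | cons y t ih =>
    simp only [List.foldl_cons]
    rw [pvInsertBy_append before y pre zs (h y (by simp))]
    exact ih _ (fun x hx a ha => h x (by simp [hx]) a ha)

theorem pvInsertBy_congr {α : Type} (p q : α → α → Bool) (x : α) (acc : List α)
    (h : ∀ a ∈ acc, p x a = q x a) :
    PySem.List.insertBy p x acc = PySem.List.insertBy q x acc := by
  induction acc with
  | nil => rfl
  | cons a t ih =>
    simp only [PySem.List.insertBy, h a (by simp)]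
    rcases Bool.eq_false_or_eq_true (q x a) with hq | hq <;>
      simp [hq, ih (fun b hb => h b (by simp [hb]))]

theorem pvFoldl_insertBy_congr {α : Type} (p q : α → α → Bool) (l : List α) :
    ∀ acc, (∀ x ∈ l, ∀ a, (a ∈ acc ∨ a ∈ l) → p x a = q x a) →
    l.foldl (fun acc x => PySem.List.insertBy p x acc) acc
      = l.foldl (fun acc x => PySem.List.insertBy q x acc) acc := by
  induction l with
  | nil => intro acc _; rfl
  | cons x t ih =>
    intro acc h
    simp only [List.foldl_cons]
    rw [pvInsertBy_congr p q x acc (fun a ha => h x (by simp) a (Or.inl ha))]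
    refine ih _ (fun y hy a ha => h y (by simp [hy]) a ?_)
    rcases ha with ha | ha
    · rcases (PySem.List.mem_insertBy q x a acc).mp ha with rfl | ha
      · exact Or.inr (by simp)
      · exact Or.inl ha
    · exact Or.inr (by simp [ha])

-- the lexicographic comparator sorted2 uses
def pvLexCmp {α : Type} (k1 k2 : α → Int) : α → α → Bool :=
  fun a b => decide (k1 a < k1 b) || (!decide (k1 b < k1 a) && decide (k2 a < k2 b))

-- a stable sort of a concatenation of blocks whose primary keys are constant per block and
-- strictly increasing across blocks = the concatenation of the blocks each sorted by the secondary key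
theorem pvFoldl_blocks {α : Type} (k1 k2 : α → Int) (gs : List (List α)) :
    gs.Pairwise (fun g h => ∀ x ∈ g, ∀ y ∈ h, k1 x < k1 y) →
    (∀ g ∈ gs, ∀ x ∈ g, ∀ y ∈ g, k1 x = k1 y) →
    gs.flatten.foldl (fun acc x => PySem.List.insertBy (pvLexCmp k1 k2) x acc) []
      = (gs.map (fun g => PySem.List.sorted g k2 false)).flatten := by
  induction gs with
  | nil => intro _ _; rfl
  | cons g rest ih =>
    intro hcross hconst
    rcases List.pairwise_cons.mp hcross with ⟨h1, hrest⟩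
    simp only [List.flatten_cons, List.foldl_append, List.map_cons]
    have step1 : g.foldl (fun acc x => PySem.List.insertBy (pvLexCmp k1 k2) x acc) []
        = PySem.List.sorted g k2 false := by
      rw [PySem.List.sorted_eq_foldl_insertBy]
      apply pvFoldl_insertBy_congr
      intro x hx a ha
      have ha' : a ∈ g := by
        rcases ha with h0 | h0
        · simp at h0
        · exact h0
      have e : k1 x = k1 a := hconst g (by simp) x hx a ha'
      simp [pvLexCmp, e]
    rw [step1]
    have step2 : rest.flatten.foldl (fun acc x => PySem.List.insertBy (pvLexCmp k1 k2) x acc)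
          (PySem.List.sorted g k2 false)
        = PySem.List.sorted g k2 false
          ++ rest.flatten.foldl (fun acc x => PySem.List.insertBy (pvLexCmp k1 k2) x acc) [] := by
      have := pvFoldl_insertBy_append (pvLexCmp k1 k2) rest.flatten
        (PySem.List.sorted g k2 false) [] ?_
      · simpa using this
      · intro x hx a ha
        have hag : a ∈ g := (PySem.List.mem_sorted g k2 false a).mp ha
        rcases List.mem_flatten.mp hx with ⟨h, hh, hxh⟩
        have hlt : k1 a < k1 x := h1 h hh a hag x hxh
        simp [pvLexCmp, not_lt.mpr (le_of_lt hlt)]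
        omega
    rw [step2, ih hrest (fun g' hg' => hconst g' (by simp [hg']))]

theorem pvSorted2_blocks {α : Type} (k1 k2 : α → Int) (gs : List (List α))
    (hcross : gs.Pairwise (fun g h => ∀ x ∈ g, ∀ y ∈ h, k1 x < k1 y))
    (hconst : ∀ g ∈ gs, ∀ x ∈ g, ∀ y ∈ g, k1 x = k1 y) :
    PySem.List.sorted2 gs.flatten k1 k2 false
      = (gs.map (fun g => PySem.List.sorted g k2 false)).flatten :=
  pvFoldl_blocks k1 k2 gs hcross hconst

-- on a nodup list, index? of the i-th element is i
theorem pvIndex?_nodup {α : Type} [BEq α] [LawfulBEq α] (L : List α) (h : L.Nodup)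
    (i : Nat) (hi : i < L.length) : PySem.List.index? L (L[i]) = some i := by
  rw [PySem.List.index?_eq_idxOf?, List.idxOf?_eq_some_iff]
  refine ⟨hi, rfl, fun j hj hEq => ?_⟩
  have := (List.Nodup.getElem_inj_iff h).mp hEq
  omega

theorem pvPairwise_idx {α : Type} [BEq α] [LawfulBEq α] (L : List α) (h : L.Nodup) :
    L.Pairwise (fun a b => (PySem.List.index? L a).getD 0 < (PySem.List.index? L b).getD 0) := by
  rw [List.pairwise_iff_getElem]
  intro i j hi hj hij
  rw [pvIndex?_nodup L h i hi, pvIndex?_nodup L h j hj]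
  simpa using hij

theorem pvLeverOrder_nodup (bottleneck : String) (scores : List (String × Int)) :
    (pvLeverOrder bottleneck scores).Nodup := by
  unfold pvLeverOrder
  refine List.nodup_cons.mpr ⟨?_, (PySem.List.nodup_dedup _).filter _⟩
  intro hmem
  simpa using (List.mem_filter.mp hmem).2

theorem pvGet_tag (lever : String) (rec : List (String × String)) :
    pvGet (("lever", lever) :: rec) "lever" = lever := by
  simp [pvGet, PySem.Dict.get?_mk_cons]

-- the tagged block one lever contributes (proof-side name for a subterm of A's port)
def pvGrp (lever : String) : List (List (String × String)) :=
  (pvRECOMMENDATIONS.getD lever []).map (fun rec => ("lever", lever) :: rec)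

-- A's port equals the concatenation, in lever order, of each tagged block sorted by effort
theorem pvA_eq_blocks (bottleneck : String) (scores : List (String × Int)) :
    get_prioritised_recs_py bottleneck scores
      = ((pvLeverOrder bottleneck scores).map
          (fun lever => PySem.List.sorted (pvGrp lever) pvK2 false)).flatten := by
  simp only [get_prioritised_recs_py]
  set L := pvLeverOrder bottleneck scores with hL
  have hcongr : ∀ (acc : List (List (String × String))) (lever : String), lever ∈ L →
      (pvRECOMMENDATIONS.getD lever []).foldl (fun acc2 rec => acc2 ++ [("lever", lever) :: rec]) acc
        = acc ++ pvGrp lever :=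
    fun acc lever _ => PySem.List.foldl_append_singleton_eq_map _ _ _
  have hA : L.foldl (fun acc lever =>
      (pvRECOMMENDATIONS.getD lever []).foldl (fun acc2 rec => acc2 ++ [("lever", lever) :: rec]) acc) []
      = (L.map pvGrp).flatten := by
    rw [PySem.List.foldl_congr_mem L _ (fun acc lever => acc ++ pvGrp lever) [] hcongr,
      PySem.List.foldl_append_eq_flatMap, List.flatMap_def]
    simp
  rw [hA]
  have := pvSorted2_blocks
    (fun r => (((PySem.List.index? L (pvGet r "lever")).getD 0 : Nat) : Int)) pvK2 (L.map pvGrp)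
    ?_ ?_
  · rw [this, List.map_map]; rfl
  · rw [List.pairwise_map]
    refine (pvPairwise_idx L (pvLeverOrder_nodup bottleneck scores)).imp ?_
    intro l₁ l₂ hlt x hx y hy
    rcases List.mem_map.mp hx with ⟨rx, _, rfl⟩
    rcases List.mem_map.mp hy with ⟨ry, _, rfl⟩
    simp only [pvGrp] at *
    simp only [pvGet_tag]
    exact_mod_cast hlt
  · intro g hg x hx y hy
    rcases List.mem_map.mp hg with ⟨lever, _, rfl⟩
    rcases List.mem_map.mp hx with ⟨rx, _, rfl⟩
    rcases List.mem_map.mp hy with ⟨ry, _, rfl⟩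
    simp only [pvGet_tag]

-- B-SIDE LEMMAS

-- dict.fromkeys(b::ks) = b :: (the other distinct keys, in order)
theorem pvAdd_mem {α : Type} [BEq α] [LawfulBEq α] (s : List α) (x : α) (h : x ∈ s) :
    PySem.Set.add s x = s := by
  simp [PySem.Set.add, List.contains_eq_mem, h]

theorem pvAdd_not_mem {α : Type} [BEq α] [LawfulBEq α] (s : List α) (x : α) (h : x ∉ s) :
    PySem.Set.add s x = s ++ [x] := by
  simp [PySem.Set.add, List.contains_eq_mem, h]

theorem pvFoldl_add_cons {α : Type} [BEq α] [LawfulBEq α] (b : α) :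
    ∀ (ks acc : List α), b ∉ acc →
    List.foldl PySem.Set.add (b :: acc) ks
      = b :: List.foldl PySem.Set.add acc (ks.filter (fun x => !(x == b))) := by
  intro ks
  induction ks with
  | nil => intro acc _; rfl
  | cons x t ih =>
    intro acc hb
    by_cases hx : x = b
    · subst hx
      have hf : (x :: t).filter (fun y => !(y == x)) = t.filter (fun y => !(y == x)) := by simp
      rw [hf, List.foldl_cons, pvAdd_mem _ _ (by simp)]
      exact ih acc hb
    · have hf : (x :: t).filter (fun y => !(y == b)) = x :: t.filter (fun y => !(y == b)) := by
        simp [hx]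
      rw [hf, List.foldl_cons, List.foldl_cons]
      by_cases hin : x ∈ acc
      · rw [pvAdd_mem _ _ (List.mem_cons_of_mem b hin), pvAdd_mem _ _ hin]
        exact ih acc hb
      · rw [pvAdd_not_mem (b :: acc) x (by simp [hx, hin]), pvAdd_not_mem acc x hin]
        show List.foldl PySem.Set.add (b :: (acc ++ [x])) t = _
        exact ih (acc ++ [x]) (by simp [hb, Ne.symm hx])

theorem pvFoldl_add_filter {α : Type} [BEq α] [LawfulBEq α] (p : α → Bool) :
    ∀ (ks acc : List α),
    List.foldl PySem.Set.add (acc.filter p) (ks.filter p)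
      = (List.foldl PySem.Set.add acc ks).filter p := by
  intro ks
  induction ks with
  | nil => intro acc; rfl
  | cons x t ih =>
    intro acc
    by_cases hp : p x
    · have hf : (x :: t).filter p = x :: t.filter p := by simp [hp]
      rw [hf, List.foldl_cons, List.foldl_cons]
      by_cases hin : x ∈ acc
      · rw [pvAdd_mem _ _ (List.mem_filter.mpr ⟨hin, hp⟩), pvAdd_mem _ _ hin]
        exact ih acc
      · rw [pvAdd_not_mem _ _ (fun h => hin (List.mem_filter.mp h).1), pvAdd_not_mem _ _ hin]
        have : acc.filter p ++ [x] = (acc ++ [x]).filter p := by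
          simp [List.filter_append, hp]
        rw [this]; exact ih (acc ++ [x])
    · have hf : (x :: t).filter p = t.filter p := by simp [hp]
      rw [hf, List.foldl_cons]
      by_cases hin : x ∈ acc
      · rw [pvAdd_mem _ _ hin]; exact ih acc
      · rw [pvAdd_not_mem _ _ hin]
        have : acc.filter p = (acc ++ [x]).filter p := by
          simp [List.filter_append, hp]
        rw [this]; exact ih (acc ++ [x])

theorem pvDedup_cons (b : String) (ks : List String) :
    PySem.List.dedup (b :: ks) = b :: ((PySem.List.dedup ks).filter (fun l => !(l == b))) := by
  simp only [PySem.List.dedup, PySem.Set.ofList, List.foldl_cons]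
  have h0 : PySem.Set.add ([] : List String) b = [b] := by
    simp [PySem.Set.add]
  have h1 := pvFoldl_add_cons b ks [] (by simp)
  have h2 := pvFoldl_add_filter (fun l => !(l == b)) ks []
  simp only [List.filter_nil] at h2
  show List.foldl PySem.Set.add (PySem.Set.add ([] : List String) b) ks = _
  rw [h0, h1]
  exact congrArg (List.cons b) h2

-- inserting a mapped element commutes with map when the comparator factors through the map
theorem pvInsertBy_map {α β : Type} (k : β → Int) (f : α → β) (x : α) (acc : List α) :
    PySem.List.insertBy (fun a b => decide (k a < k b)) (f x) (acc.map f)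
      = (PySem.List.insertBy (fun a b => decide (k (f a) < k (f b))) x acc).map f := by
  induction acc with
  | nil => rfl
  | cons a t ih =>
    simp only [List.map_cons, PySem.List.insertBy]
    rcases Bool.eq_false_or_eq_true (decide (k (f x) < k (f a))) with h | h <;> simp [h, ih]

-- sorting a mapped list = mapping the list sorted by the composed key
theorem pvSorted_map (k : _ → Int) (f : List (String × String) → List (String × String))
    (l : List (List (String × String))) :
    PySem.List.sorted (l.map f) k false
      = (PySem.List.sorted l (fun x => k (f x)) false).map f := by
  rw [PySem.List.sorted_eq_foldl_insertBy, PySem.List.sorted_eq_foldl_insertBy]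
  induction l using List.reverseRecOn with
  | nil => rfl
  | append_singleton t x ih =>
    simp only [List.map_append, List.map_cons, List.map_nil, List.foldl_append, List.foldl_cons,
      List.foldl_nil, ih, pvInsertBy_map]

-- looking up B's pre-sorted table = sorting A's table entry (checked on the literal dicts)
theorem pvBY_EFFORT_getD (lever : String) :
    pvBY_EFFORT.getD lever []
      = PySem.List.sorted (pvRECOMMENDATIONS.getD lever []) pvEffortKey false := by
  simp only [pvBY_EFFORT, pvRECOMMENDATIONS, PySem.Dict.getD,
    List.map_cons, List.map_nil, PySem.Dict.get?_mk_cons]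
  split_ifs <;> rfl

-- the effort key ignores the 'lever' tag
theorem pvK2_tag (lever : String) :
    (fun rec => pvK2 (("lever", lever) :: rec)) = pvEffortKey := by
  funext rec
  simp [pvK2, pvEffortKey, pvGet, PySem.Dict.get?_mk_cons]

-- B's port, unfolded to the same block concatenation
theorem pvB_eq_blocks (bottleneck : String) (scores : List (String × Int)) :
    get_prioritised_recs_py_alt bottleneck scores
      = ((pvLeverOrder bottleneck scores).map
          (fun lever => PySem.List.sorted (pvGrp lever) pvK2 false)).flatten := by
  have hblock : ∀ lever : String,
      (pvBY_EFFORT.getD lever []).map (fun rec => ("lever", lever) :: rec)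
        = PySem.List.sorted (pvGrp lever) pvK2 false := by
    intro lever
    rw [pvBY_EFFORT_getD, pvGrp, pvSorted_map, pvK2_tag]
  show (PySem.List.dedup (bottleneck :: scores.map Prod.fst)).foldl _ [] = _
  rw [PySem.List.foldl_append_eq_flatMap, List.flatMap_def, pvDedup_cons,
    funext hblock]
  rfl

-- ===== VERDICT (by name: the statement is the Claim_ definition above) =====
theorem get_prioritised_recs_py_spec : Claim_equal_get_prioritised_recs_py := by
  intro bottleneck scores _
  show get_prioritised_recs_py bottleneck scores = get_prioritised_recs_py_alt bottleneck scores
  rw [pvA_eq_blocks, pvB_eq_blocks]
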